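-- pv_equiv track=rewrite | github.com/yefengtian/cockpit_agent_demo | services/nav_service/providers/amap_mcp.py | _pick_tool_name
-- ===== SOURCE A (Python) =====
-- from typing import Any, Dict, List, Optional, Tuple
--
-- def _pick_tool_name(tools: List[Dict[str, Any]], keywords: Tuple[str, ...]) -> Optional[str]:
--     names = [str(t.get("name", "")) for t in tools if isinstance(t, dict)]
--     # 1) exact keyword match
--     for n in names:
--         if n in keywords:
--             return n
--     # 2) fuzzy contains all tokens
--     for n in names:
--         low = n.lower()
--         if all(k in low for k in keywords):
--             return n
--     return None
-- ===== SOURCE B (Python) =====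
-- from typing import Any, Dict, List, Optional, Tuple
--
-- def _pick_tool_name(tools: List[Dict[str, Any]], keywords: Tuple[str, ...]) -> Optional[str]:
--     # single pass: return on first exact match, remember the first fuzzy match
--     fuzzy: Optional[str] = None
--     for t in tools:
--         if not isinstance(t, dict):
--             continue
--         n = str(t.get("name", ""))
--         if n in keywords:
--             return n
--         if fuzzy is None:
--             low = n.lower()
--             if all(k in low for k in keywords):
--                 fuzzy = n
--     return fuzzy
-- ===== Notes on version B (the rewrite author's own statement) =====
-- stated objective: alternative
-- what changed: A builds a names list and makes two sequential passes (exact, then fuzzy); B makes one pass over the tools, returning immediately on an exact match while remembering the first fuzzy match as a fallback.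
import Mathlib
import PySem

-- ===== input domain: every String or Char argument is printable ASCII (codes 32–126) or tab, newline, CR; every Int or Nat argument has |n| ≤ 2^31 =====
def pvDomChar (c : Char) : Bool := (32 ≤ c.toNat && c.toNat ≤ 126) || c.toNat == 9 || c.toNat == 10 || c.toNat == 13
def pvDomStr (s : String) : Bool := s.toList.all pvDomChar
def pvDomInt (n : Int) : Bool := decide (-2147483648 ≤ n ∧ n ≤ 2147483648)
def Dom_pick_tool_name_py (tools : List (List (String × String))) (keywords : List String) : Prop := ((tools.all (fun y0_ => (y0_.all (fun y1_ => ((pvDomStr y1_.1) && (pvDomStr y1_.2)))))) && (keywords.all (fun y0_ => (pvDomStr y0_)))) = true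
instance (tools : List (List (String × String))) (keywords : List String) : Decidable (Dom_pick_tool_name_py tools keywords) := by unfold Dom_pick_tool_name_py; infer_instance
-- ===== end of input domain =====

-- ===== PORT A =====
-- B changes the decomposition only: one pass with a saved fuzzy fallback instead of A's two passes.
def pvFuzzyOk (keywords : List String) (n : String) : Bool :=
  keywords.all (fun k => PySem.Str.isIn k (PySem.Str.lower n))

-- first loop of A: exact keyword membership
def pvExactLoop (keywords : List String) : List String → Option String
  | [] => none
  | n :: ns => if keywords.contains n then some n else pvExactLoop keywords ns

-- second loop of A: all keywords contained in n.lower()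
def pvFuzzyLoop (keywords : List String) : List String → Option String
  | [] => none
  | n :: ns => if pvFuzzyOk keywords n then some n else pvFuzzyLoop keywords ns

def pick_tool_name_py (tools : List (List (String × String))) (keywords : List String) : Option String :=
  let names := tools.map (fun t => (PySem.Dict.mk t).getD "name" "")
  match pvExactLoop keywords names with
  | some n => some n
  | none => pvFuzzyLoop keywords names

-- ===== PORT B =====
-- single pass over tools, carrying the first fuzzy match found so far
def pvOnePass (keywords : List String) : List (List (String × String)) → Option String → Option String
  | [], fuzzy => fuzzy
  | t :: ts, fuzzy =>
    let n := (PySem.Dict.mk t).getD "name" ""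
    if keywords.contains n then some n
    else pvOnePass keywords ts
      (if fuzzy = none then (if pvFuzzyOk keywords n then some n else fuzzy) else fuzzy)

def pick_tool_name_py_alt (tools : List (List (String × String))) (keywords : List String) : Option String :=
  pvOnePass keywords tools none

-- ===== PRECONDITION & SPEC =====
def Spec_pick_tool_name_py (tools : List (List (String × String))) (keywords : List String) (out : Option String) : Prop := out = pick_tool_name_py_alt tools keywords
instance (tools : List (List (String × String))) (keywords : List String) (out : Option String) : Decidable (Spec_pick_tool_name_py tools keywords out) := by unfold Spec_pick_tool_name_py; infer_instance

-- ===== CLAIM (what is proved, stated in full; the proofs are below) =====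
def Claim_equal_pick_tool_name_py : Prop := ∀ (tools : List (List (String × String))) (keywords : List String), Dom_pick_tool_name_py tools keywords → Spec_pick_tool_name_py tools keywords (pick_tool_name_py tools keywords)

-- ===== LEMMAS AND PROOFS =====

-- the one-pass loop equals: first exact hit, else saved fuzzy, else first fuzzy hit
theorem pvOnePass_eq (keywords : List String) (ts : List (List (String × String))) (fuzzy : Option String) :
    pvOnePass keywords ts fuzzy =
      ((pvExactLoop keywords (ts.map (fun t => (PySem.Dict.mk t).getD "name" ""))).or
        (fuzzy.or (pvFuzzyLoop keywords (ts.map (fun t => (PySem.Dict.mk t).getD "name" ""))))) := by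
  induction ts generalizing fuzzy with
  | nil => simp [pvOnePass, pvExactLoop, pvFuzzyLoop]
  | cons t ts ih =>
    simp only [pvOnePass, List.map_cons, pvExactLoop, pvFuzzyLoop]
    by_cases hex : keywords.contains ((PySem.Dict.mk t).getD "name" "") = true
    · rw [if_pos hex, if_pos hex]
      simp
    · rw [if_neg hex, if_neg hex, ih]
      cases fuzzy with
      | none => by_cases hf : pvFuzzyOk keywords ((PySem.Dict.mk t).getD "name" "") = true <;>
          simp [hf]
      | some v => simp

-- ===== VERDICT (by name: the statement is the Claim_ definition above) =====
theorem pick_tool_name_py_spec : Claim_equal_pick_tool_name_py := by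
  intro tools keywords _
  unfold Spec_pick_tool_name_py pick_tool_name_py pick_tool_name_py_alt
  rw [pvOnePass_eq]
  cases h : pvExactLoop keywords (tools.map (fun t => (PySem.Dict.mk t).getD "name" "")) <;>
    simp [h]
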